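-- pv_equiv track=rewrite | github.com/BakitD/Codility | 99/strsym.py | solution
-- ===== SOURCE A (Python) =====
-- def solution(S):
--     n = len(S)
--     if n == 1: return 0
--     if n == 2: return -1
--     if n == 3 and S[0] != S[2]: return -1
--     if n % 2 == 0: return -1
--
--     for i in range(n):
--         if S[i] != S[n-i-1]: return -1
--     return n // 2
-- ===== SOURCE B (Python) =====
-- def solution(S):
--     # Odd length required; then test palindromicity by recursive inward peeling:
--     # compare the two ends and recurse on the interior, stopping at the middle.
--     n = len(S)
--     if n % 2 == 0:
--         return -1
--
--     def pal(lo, hi):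
--         return lo >= hi or (S[lo] == S[hi] and pal(lo + 1, hi - 1))
--
--     return n // 2 if pal(0, n - 1) else -1
-- ===== Notes on version B (the rewrite author's own statement) =====
-- stated objective: alternative
-- what changed: Replaces A's guard cascade plus full-range index loop (all n comparisons i vs n-i-1) with a single even-length rule and a recursive two-pointer peel that compares the ends and recurses on the interior, stopping at the middle (n/2 comparisons).
import Mathlib
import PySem

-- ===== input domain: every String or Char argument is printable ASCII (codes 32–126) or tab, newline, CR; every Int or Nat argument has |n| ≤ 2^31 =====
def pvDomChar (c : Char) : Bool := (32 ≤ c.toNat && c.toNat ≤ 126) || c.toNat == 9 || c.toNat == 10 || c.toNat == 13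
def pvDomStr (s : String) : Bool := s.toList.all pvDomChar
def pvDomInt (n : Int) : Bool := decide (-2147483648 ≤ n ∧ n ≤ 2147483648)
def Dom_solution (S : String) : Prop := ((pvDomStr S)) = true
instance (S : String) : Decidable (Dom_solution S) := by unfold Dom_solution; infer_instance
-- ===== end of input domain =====

-- B replaces A's guard cascade + full-range index loop with one even-length rule and a
-- recursive two-pointer peel (compare ends, recurse on interior) — objective: alternative.

-- ===== PORT A =====
-- A's for-loop with early return; indices i and n-i-1 are always in range, so
-- List.getD is exact for Python's S[i] here.
def solutionLoop (s : List Char) (n : Nat) (i : Nat) : Int :=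
  if _h : i < n then
    if s.getD i ' ' ≠ s.getD (n - i - 1) ' ' then -1
    else solutionLoop s n (i + 1)
  else (n / 2 : Nat)
termination_by n - i

def solution (S : String) : Int :=
  let s := S.toList
  let n := s.length
  if n = 1 then 0
  else if n = 2 then -1
  else if n = 3 ∧ s.getD 0 ' ' ≠ s.getD 2 ' ' then -1
  else if n % 2 = 0 then -1
  else solutionLoop s n 0

-- ===== PORT B =====
-- B's recursive helper pal(lo, hi); indices lo, hi are always in range when called,
-- so List.getD is exact for Python's S[lo], S[hi] here.
def palRec (s : List Char) (lo hi : Nat) : Bool :=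
  if _h : lo ≥ hi then true
  else s.getD lo ' ' == s.getD hi ' ' && palRec s (lo + 1) (hi - 1)
termination_by hi - lo

def solution_alt (S : String) : Int :=
  let n := S.toList.length
  if n % 2 = 0 then -1
  else if palRec S.toList 0 (n - 1) then (n / 2 : Nat) else -1

-- ===== PRECONDITION & SPEC =====
def Spec_solution (S : String) (out : Int) : Prop := out = solution_alt S
instance (S : String) (out : Int) : Decidable (Spec_solution S out) := by unfold Spec_solution; infer_instance

-- ===== CLAIM (what is proved, stated in full; the proofs are below) =====
def Claim_equal_solution : Prop := ∀ (S : String), Dom_solution S → Spec_solution S (solution S)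

-- ===== LEMMAS AND PROOFS =====

lemma loop_spec (s : List Char) (n : Nat) (i : Nat) :
    solutionLoop s n i =
      if ∀ j, i ≤ j → j < n → s.getD j ' ' = s.getD (n - j - 1) ' ' then ((n / 2 : Nat) : Int)
      else -1 := by
  induction' hk : n - i using Nat.strong_induction_on with k ih generalizing i
  rw [solutionLoop]
  by_cases hlt : i < n
  · simp only [hlt, dif_pos]
    by_cases hne : s.getD i ' ' ≠ s.getD (n - i - 1) ' '
    · rw [if_pos hne, if_neg]
      intro hall
      exact hne (hall i le_rfl hlt)
    · rw [ne_eq, not_not] at hne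
      rw [if_neg (not_not.2 hne)]
      rw [ih (n - (i + 1)) (by omega) (i + 1) rfl]
      by_cases hall : ∀ j, i + 1 ≤ j → j < n → s.getD j ' ' = s.getD (n - j - 1) ' '
      · rw [if_pos hall, if_pos]
        intro j hij hjn
        rcases Nat.eq_or_lt_of_le hij with h | h
        · subst h; exact hne
        · exact hall j h hjn
      · rw [if_neg hall, if_neg]
        intro hall'
        exact hall fun j hij hjn => hall' j (by omega) hjn
  · simp only [hlt, dif_neg, not_false_iff]
    rw [if_pos]
    intro j hij hjn
    omega

lemma palRec_spec (s : List Char) (lo hi : Nat) :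
    palRec s lo hi = true ↔
      ∀ j, lo ≤ j → j ≤ hi → s.getD j ' ' = s.getD (lo + hi - j) ' ' := by
  induction' hk : hi - lo using Nat.strong_induction_on with k ih generalizing lo hi
  rw [palRec]
  by_cases hge : lo ≥ hi
  · simp only [hge, dif_pos, true_iff]
    intro j h1 h2
    have : j = lo ∧ lo = hi ∨ lo > hi := by omega
    rcases this with ⟨rfl, rfl⟩ | h
    · congr 1; omega
    · omega
  · simp only [hge, dif_neg, not_false_iff, Bool.and_eq_true, beq_iff_eq]
    rw [ih (hi - 1 - (lo + 1)) (by omega) (lo + 1) (hi - 1) rfl]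
    constructor
    · rintro ⟨hends, hmid⟩ j h1 h2
      rcases Nat.eq_or_lt_of_le h1 with h | h1'
      · subst h
        have : lo + hi - lo = hi := by omega
        rw [this]; exact hends
      · rcases Nat.eq_or_lt_of_le h2 with h | h2'
        · subst h
          have : lo + j - j = lo := by omega
          rw [this]; exact hends.symm
        · have := hmid j (by omega) (by omega)
          have heq : lo + 1 + (hi - 1) - j = lo + hi - j := by omega
          rw [heq] at this; exact this
    · intro hall
      refine ⟨?_, fun j h1 h2 => ?_⟩
      · have := hall lo le_rfl (by omega)
        have heq : lo + hi - lo = hi := by omega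
        rw [heq] at this; exact this
      · have := hall j (by omega) (by omega)
        have heq : lo + hi - j = lo + 1 + (hi - 1) - j := by omega
        rw [heq] at this; exact this

lemma loop_eq_palRec (s : List Char) (n : Nat) (hn : n = s.length) (hpos : 0 < n) :
    solutionLoop s n 0 = if palRec s 0 (n - 1) then ((n / 2 : Nat) : Int) else -1 := by
  rw [loop_spec]
  congr 1
  simp only [eq_iff_iff]
  rw [palRec_spec]
  constructor
  · intro h j _ h2
    have := h j (Nat.zero_le _) (by omega)
    have heq : 0 + (n - 1) - j = n - j - 1 := by omega
    rw [heq]; exact this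
  · intro h j _ h2
    have := h j (Nat.zero_le _) (by omega)
    have heq : 0 + (n - 1) - j = n - j - 1 := by omega
    rw [heq] at this; exact this

-- ===== VERDICT (by name: the statement is the Claim_ definition above) =====
theorem solution_spec : Claim_equal_solution := by
  intro S _
  unfold Spec_solution solution solution_alt
  set s := S.toList with hs
  simp only
  by_cases h1 : s.length = 1
  · rw [if_pos h1, h1]
    norm_num
    rw [palRec]
    simp
  · rw [if_neg h1]
    by_cases h2 : s.length = 2
    · rw [if_pos h2, h2]; norm_num
    · rw [if_neg h2]
      by_cases h3 : s.length = 3 ∧ s.getD 0 ' ' ≠ s.getD 2 ' '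
      · rw [if_pos h3, h3.1]
        norm_num
        rw [Bool.eq_false_iff]
        intro hpal
        have := (palRec_spec s 0 2).1 hpal 0 (le_rfl) (by omega)
        exact h3.2 (by simpa using this)
      · rw [if_neg h3]
        by_cases he : s.length % 2 = 0
        · rw [if_pos he, if_pos he]
        · rw [if_neg he, if_neg he, loop_eq_palRec s s.length rfl (by omega)]
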